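-- pv_equiv track=rewrite | github.com/Suknna/maintenance-toolkit | python/vsphere/setup_cluster.py | proc_text
-- ===== SOURCE A (Python) =====
-- def proc_text(content_list):
--
--     text_list = list()
--     for single_cluster in range(0, len(content_list)):
--         single_cluster_key = list(content_list[single_cluster].keys())
--         single_cluster_values = list(content_list[single_cluster].values())
--         if single_cluster == 0:
--             for i in range(0, len(single_cluster_key)):
--                 if i != len(single_cluster_key) - 1:
--                     text_list.append(single_cluster_key[i] + ",")
--                 else:
--                     text_list.append(single_cluster_key[i] + "\n")
--             for n in range(0, len(single_cluster_values)):
--                 if n != len(single_cluster_values) - 1: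
--                     text_list.append(str(single_cluster_values[n]) + ",")
--                 else:
--                     text_list.append(str(single_cluster_values[n]) + "\n")
--         else:
--             for n in range(0, len(single_cluster_values)):
--                 if n != len(single_cluster_values) - 1:
--                     text_list.append(str(single_cluster_values[n]) + ",")
--                 else:
--                     text_list.append(str(single_cluster_values[n]) + "\n")
--     return text_list
-- ===== SOURCE B (Python) =====
-- def row_tokens(fields):
--     if len(fields) <= 1:
--         return [f + "\n" for f in fields]
--     return [fields[0] + ","] + row_tokens(fields[1:])
--
-- def proc_text(content_list):
--     out = []
--     for d in reversed(content_list):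
--         out = row_tokens([str(v) for v in d.values()]) + out
--     if content_list:
--         out = row_tokens(list(content_list[0].keys())) + out
--     return out
-- ===== Notes on version B (the rewrite author's own statement) =====
-- stated objective: alternative
-- what changed: Replaces A's forward index loops with i != len-1 separator tests by a recursive row tokenizer (head field gets ',', the lone last field gets a newline) and assembles the output back-to-front, prepending each dict's values row while iterating reversed(content_list) and prepending the header row last.
import Mathlib
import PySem

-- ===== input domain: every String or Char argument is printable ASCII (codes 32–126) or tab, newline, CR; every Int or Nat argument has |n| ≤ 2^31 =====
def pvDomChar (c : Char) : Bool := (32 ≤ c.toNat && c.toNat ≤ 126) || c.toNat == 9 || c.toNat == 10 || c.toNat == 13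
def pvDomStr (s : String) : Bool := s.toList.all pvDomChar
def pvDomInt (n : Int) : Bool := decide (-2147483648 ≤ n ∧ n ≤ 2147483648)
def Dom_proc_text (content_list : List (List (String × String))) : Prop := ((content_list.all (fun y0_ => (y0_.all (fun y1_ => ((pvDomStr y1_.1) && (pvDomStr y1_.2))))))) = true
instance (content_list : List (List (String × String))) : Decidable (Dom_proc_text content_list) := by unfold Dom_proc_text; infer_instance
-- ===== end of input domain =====

-- B replaces A's forward index loops (separator by i != len-1) with a recursive row
-- tokenizer (head gets ",", the final singleton gets "\n") and assembles the output
-- back-to-front, prepending each dict's row while walking content_list reversed and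
-- prepending the header row last. Objective: alternative decomposition (list prepends cost more on large inputs).

-- ===== PORT A =====
-- literal transliteration of A: outer loop over range(0, len(content_list)), inner index loops
-- appending field + "," / "\n"; Python's str(v) on a value that IS a str is the identity.
def proc_text (content_list : List (List (String × String))) : List String :=
  (PySem.List.pyRange 0 (content_list.length : Int) 1).foldl
    (fun text_list single_cluster =>
      let d := PySem.List.pyGetD content_list single_cluster []
      let single_cluster_key := d.map Prod.fst
      let single_cluster_values := d.map Prod.snd
      if single_cluster = 0 then
        let t1 := (PySem.List.pyRange 0 (single_cluster_key.length : Int) 1).foldl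
          (fun acc i => acc ++ [PySem.List.pyGetD single_cluster_key i "" ++
            (if i ≠ (single_cluster_key.length : Int) - 1 then "," else "\n")]) text_list
        (PySem.List.pyRange 0 (single_cluster_values.length : Int) 1).foldl
          (fun acc n => acc ++ [PySem.List.pyGetD single_cluster_values n "" ++
            (if n ≠ (single_cluster_values.length : Int) - 1 then "," else "\n")]) t1
      else
        (PySem.List.pyRange 0 (single_cluster_values.length : Int) 1).foldl
          (fun acc n => acc ++ [PySem.List.pyGetD single_cluster_values n "" ++
            (if n ≠ (single_cluster_values.length : Int) - 1 then "," else "\n")]) text_list)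
    []

-- ===== PORT B =====
-- row_tokens: structural recursion, head field gets ",", the lone last field gets "\n"
def rowTokens : List String → List String
  | [] => []
  | [f] => [f ++ "\n"]
  | f :: g :: rest => (f ++ ",") :: rowTokens (g :: rest)

-- back-to-front assembly: walk reversed(content_list) prepending each values row,
-- then prepend the header row if content_list is nonempty
def proc_text_alt (content_list : List (List (String × String))) : List String :=
  let out := content_list.reverse.foldl
    (fun out d => rowTokens (d.map Prod.snd) ++ out) []
  match content_list with
  | [] => out
  | first :: _ => rowTokens (first.map Prod.fst) ++ out

-- ===== PRECONDITION & SPEC =====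
def Spec_proc_text (content_list : List (List (String × String))) (out : List String) : Prop := out = proc_text_alt content_list
instance (content_list : List (List (String × String))) (out : List String) : Decidable (Spec_proc_text content_list out) := by unfold Spec_proc_text; infer_instance

-- ===== CLAIM (what is proved, stated in full; the proofs are below) =====
def Claim_equal_proc_text : Prop := ∀ (content_list : List (List (String × String))), Dom_proc_text content_list → Spec_proc_text content_list (proc_text content_list)

-- ===== LEMMAS AND PROOFS =====

-- canonical row shape used only by the proofs
def pvEmitRow (row : List String) : List String :=
  row.dropLast.map (fun f => f ++ ",") ++ (row.drop (row.length - 1)).map (fun f => f ++ "\n")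

-- B's recursive tokenizer produces the canonical row
theorem pv_rowTokens_eq (row : List String) : rowTokens row = pvEmitRow row := by
  induction row with
  | nil => rfl
  | cons f rest ih =>
    cases rest with
    | nil => rfl
    | cons g rest' =>
      simp only [rowTokens, ih, pvEmitRow]
      rw [List.dropLast_cons_of_ne_nil (l := g :: rest') (by simp)]
      simp

-- A's inner index loop over range(len(vs)) emits exactly the canonical row
theorem pv_row_eq (vs : List String) :
    List.map (fun n => PySem.List.pyGetD vs n "" ++ (if n ≠ (vs.length : Int) - 1 then "," else "\n"))
      (PySem.List.pyRange 0 (vs.length : Int) 1) = pvEmitRow vs := by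
  rw [PySem.List.pyRange_zero_natCast, List.map_map]
  unfold pvEmitRow
  apply List.ext_getElem
  · simp
  · intro k h1 h2
    simp only [List.getElem_map, List.getElem_range, Function.comp_apply,
      PySem.List.pyGetD_natCast]
    simp only [List.length_map, List.length_range] at h1
    by_cases hk : k < vs.length - 1
    · rw [List.getElem_append_left (by simpa [List.length_dropLast] using hk)]
      have : (↑k : Int) ≠ ↑vs.length - 1 := by omega
      simp [this, List.getElem_dropLast, List.getElem?_eq_getElem h1]
    · have hk1 : k = vs.length - 1 := by omega
      rw [List.getElem_append_right (by simp [List.length_dropLast]; omega)]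
      have hne : ¬((↑k : Int) ≠ ↑vs.length - 1) := by omega
      simp only [hne, if_false, List.length_map, List.length_dropLast,
        List.getElem_map, List.getElem_drop]
      rw [List.getD_eq_getElem vs "" h1]
      have hg : vs[k] = vs[vs.length - 1 + (k - (vs.length - 1))]'(by omega) :=
        getElem_congr rfl (by omega) (by omega)
      rw [← hg]

-- indexed flatMap over range(len(xs)) is structural flatMap
theorem pv_flatMap_range_getD {α β : Type} (xs : List α) (d : α) (f : α → List β) :
    (List.range xs.length).flatMap (fun k => f (xs.getD k d)) = xs.flatMap f := by
  induction xs with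
  | nil => simp
  | cons x xs ih =>
    rw [List.length_cons, List.range_succ_eq_map, List.flatMap_cons, List.flatMap_map]
    simpa using congrArg (f x ++ ·) ih

-- prepending while folding over the reversed list is structural flatMap
theorem pv_rev_foldl_flatMap {α β : Type} (l : List α) (f : α → List β) :
    l.reverse.foldl (fun out d => f d ++ out) [] = l.flatMap f := by
  induction l with
  | nil => rfl
  | cons x xs ih =>
    rw [List.reverse_cons, List.foldl_append, ih, List.flatMap_cons]
    rfl

-- A in canonical form
theorem pv_a_eq (first : List (String × String)) (rest : List (List (String × String))) :
    proc_text (first :: rest) =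
      pvEmitRow (first.map Prod.fst) ++
        (first :: rest).flatMap (fun d => pvEmitRow (d.map Prod.snd)) := by
  unfold proc_text
  rw [PySem.List.foldl_congr_mem _ _
    (fun acc i =>
      acc ++ (if i = 0 then
          pvEmitRow ((PySem.List.pyGetD (first :: rest) i []).map Prod.fst) ++
            pvEmitRow ((PySem.List.pyGetD (first :: rest) i []).map Prod.snd)
        else pvEmitRow ((PySem.List.pyGetD (first :: rest) i []).map Prod.snd))) _
    (by
      intro acc i _
      by_cases hi : i = 0
      · simp only [hi, if_true, PySem.List.foldl_append_singleton_eq_map,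
          pv_row_eq, List.append_assoc]
      · simp only [hi, if_false, PySem.List.foldl_append_singleton_eq_map, pv_row_eq])]
  rw [PySem.List.foldl_append_eq_flatMap]
  simp only [List.length_cons, PySem.List.pyRange_zero_natCast, List.flatMap_map,
    List.range_succ_eq_map, List.flatMap_cons]
  have hfun : (fun a : Nat =>
      if ((a.succ : Nat) : Int) = 0 then
        pvEmitRow ((PySem.List.pyGetD (first :: rest) ((a.succ : Nat) : Int) []).map Prod.fst) ++
          pvEmitRow ((PySem.List.pyGetD (first :: rest) ((a.succ : Nat) : Int) []).map Prod.snd)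
      else pvEmitRow ((PySem.List.pyGetD (first :: rest) ((a.succ : Nat) : Int) []).map Prod.snd)) =
      (fun a : Nat => pvEmitRow ((rest.getD a []).map Prod.snd)) := by
    funext a
    have ha2 : ((a : Int) + 1) = ((a + 1 : Nat) : Int) := by push_cast; ring
    have ha : ¬(((a : Int) + 1) = 0) := by omega
    simp only [PySem.List.pyGetD_natCast]
    simp [List.getD]
    exact fun h => absurd h (by omega)
  rw [hfun, pv_flatMap_range_getD rest [] (fun d => pvEmitRow (d.map Prod.snd))]
  norm_num [PySem.List.pyGetD_natCast]

theorem pv_main_eq (content_list : List (List (String × String))) :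
    proc_text content_list = proc_text_alt content_list := by
  cases content_list with
  | nil => rfl
  | cons first rest =>
    rw [pv_a_eq]
    show _ = rowTokens (first.map Prod.fst) ++
      (first :: rest).reverse.foldl (fun out d => rowTokens (d.map Prod.snd) ++ out) []
    rw [pv_rev_foldl_flatMap, pv_rowTokens_eq]
    congr 1
    exact (List.flatMap_congr (fun d _ => (pv_rowTokens_eq (d.map Prod.snd)))).symm

-- ===== VERDICT (by name: the statement is the Claim_ definition above) =====
theorem proc_text_spec : Claim_equal_proc_text := by
  intro content_list _
  exact pv_main_eq content_list
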